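-- pv_equiv track=rewrite | github.com/ess-dg/dg_MultiBlade_MBUTY | MBUTYcap/lib/libConfigGenerator.py | _generateCassette2ElectronicsConfigMG
-- ===== SOURCE A (Python) =====
-- def _generateCassette2ElectronicsConfigMG(num_cassettes):
--     cassette_config = []
--     ring    = 0
--     hybridW = 0
--     hybridS = 1
--     for i in range(num_cassettes):
--         cassette_config.append({
--             "ID": i,
--             "Ring": ring,
--             "Fen": 0,
--             "HybridW": hybridW,
--             "HybridS": hybridS
--         })
--         hybridW += 2
--         hybridS += 2
--         if hybridS >= 4:
--             ring += 1
--             hybridW = 0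
--             hybridS = 1
--
--     return cassette_config
-- ===== SOURCE B (Python) =====
-- def _generateCassette2ElectronicsConfigMG(num_cassettes):
--     # closed form: each entry depends only on its index
--     return [{
--         "ID": i,
--         "Ring": i // 2,
--         "Fen": 0,
--         "HybridW": 2 * (i % 2),
--         "HybridS": 2 * (i % 2) + 1
--     } for i in range(num_cassettes)]
-- ===== Notes on version B (the rewrite author's own statement) =====
-- stated objective: simpler
-- what changed: Replaces the stateful loop with carried ring/hybridW/hybridS accumulators and a conditional reset branch by a list comprehension computing each entry in closed form from its index (ring=i//2, hybrids from i%2).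
import Mathlib
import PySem

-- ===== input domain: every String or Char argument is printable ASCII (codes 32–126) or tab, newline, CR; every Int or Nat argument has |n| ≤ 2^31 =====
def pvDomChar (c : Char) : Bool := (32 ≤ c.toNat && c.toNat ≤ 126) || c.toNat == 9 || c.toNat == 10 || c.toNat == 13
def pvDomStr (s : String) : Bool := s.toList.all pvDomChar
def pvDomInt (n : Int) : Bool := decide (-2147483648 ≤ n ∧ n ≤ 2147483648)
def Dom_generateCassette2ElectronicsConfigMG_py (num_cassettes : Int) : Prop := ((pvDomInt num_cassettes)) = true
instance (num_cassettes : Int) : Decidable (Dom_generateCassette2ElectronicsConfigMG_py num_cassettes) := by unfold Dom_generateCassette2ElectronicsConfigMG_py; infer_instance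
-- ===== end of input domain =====

-- B replaces A's stateful loop (running ring/hybridW/hybridS with a reset branch)
-- by a closed-form per-index computation; objective: simpler.


-- ===== PORT A =====
-- one loop iteration: append the dict, bump the hybrids, reset on hybridS >= 4
def pvStepA (st : List (List (String × Int)) × Int × Int × Int) (i : Int) :
    List (List (String × Int)) × Int × Int × Int :=
  let acc := st.1 ++ [[("ID", i), ("Ring", st.2.1), ("Fen", (0:Int)),
                      ("HybridW", st.2.2.1), ("HybridS", st.2.2.2)]]
  let hW := st.2.2.1 + 2
  let hS := st.2.2.2 + 2
  if hS ≥ 4 then (acc, st.2.1 + 1, 0, 1) else (acc, st.2.1, hW, hS)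

def generateCassette2ElectronicsConfigMG_py (num_cassettes : Int) : List (List (String × Int)) :=
  ((PySem.List.pyRange 0 num_cassettes 1).foldl pvStepA ([], 0, 0, 1)).1

-- ===== PORT B =====
def pvEntryB (i : Int) : List (String × Int) :=
  [("ID", i), ("Ring", PySem.Int.floordiv i 2), ("Fen", 0),
   ("HybridW", 2 * PySem.Int.mod i 2), ("HybridS", 2 * PySem.Int.mod i 2 + 1)]

def generateCassette2ElectronicsConfigMG_py_alt (num_cassettes : Int) : List (List (String × Int)) :=
  (PySem.List.pyRange 0 num_cassettes 1).map pvEntryB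

-- ===== PRECONDITION & SPEC =====
def Spec_generateCassette2ElectronicsConfigMG_py (num_cassettes : Int) (out : List (List (String × Int))) : Prop := out = generateCassette2ElectronicsConfigMG_py_alt num_cassettes
instance (num_cassettes : Int) (out : List (List (String × Int))) : Decidable (Spec_generateCassette2ElectronicsConfigMG_py num_cassettes out) := by unfold Spec_generateCassette2ElectronicsConfigMG_py; infer_instance

-- ===== CLAIM (what is proved, stated in full; the proofs are below) =====
def Claim_equal_generateCassette2ElectronicsConfigMG_py : Prop := ∀ (num_cassettes : Int), Dom_generateCassette2ElectronicsConfigMG_py num_cassettes → Spec_generateCassette2ElectronicsConfigMG_py num_cassettes (generateCassette2ElectronicsConfigMG_py num_cassettes)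

-- ===== LEMMAS AND PROOFS =====
-- One iteration of A's loop, started from the closed-form state for index m,
-- appends B's closed-form entry and lands in the closed-form state for m+1.
theorem pvStepClosed (acc : List (List (String × Int))) (m : Nat) :
    pvStepA (acc, ((m / 2 : Nat) : Int), ((2 * (m % 2) : Nat) : Int), ((2 * (m % 2) + 1 : Nat) : Int)) (m : Int)
      = (acc ++ [pvEntryB (m : Int)],
         (((m+1) / 2 : Nat) : Int), ((2 * ((m+1) % 2) : Nat) : Int), ((2 * ((m+1) % 2) + 1 : Nat) : Int)) := by
  have hd : PySem.Int.floordiv (m : Int) 2 = ((m / 2 : Nat) : Int) := by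
    exact_mod_cast PySem.Int.floordiv_natCast m 2
  have hm : PySem.Int.mod (m : Int) 2 = ((m % 2 : Nat) : Int) := by
    exact_mod_cast PySem.Int.mod_natCast m 2
  simp only [pvStepA, pvEntryB, hd, hm]
  rcases Nat.even_or_odd m with ⟨t, rfl⟩ | ⟨t, rfl⟩ <;>
    [(have h2 : (t + t) % 2 = 0 := by omega);
     (have h2 : (2 * t + 1) % 2 = 1 := by omega)] <;>
    split_ifs with hif <;>
    simp_all [Prod.ext_iff] <;> omega

-- Loop invariant: after processing range n the accumulator is the closed-form map and
-- A's carried state is (n/2, 2*(n%2), 2*(n%2)+1).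
theorem pvLoopInv (n : Nat) :
    ((List.range n).map (fun (k : Nat) => (k : Int))).foldl pvStepA ([], 0, 0, 1) =
      ((List.range n).map (fun (k : Nat) => pvEntryB (k : Int)),
       ((n / 2 : Nat) : Int), ((2 * (n % 2) : Nat) : Int), ((2 * (n % 2) + 1 : Nat) : Int)) := by
  induction n with
  | zero => simp
  | succ m ih =>
    simp only [List.range_succ, List.map_append, List.foldl_append, List.map_cons,
      List.map_nil, List.foldl_cons, List.foldl_nil] at ih ⊢
    rw [ih, pvStepClosed]

-- ===== VERDICT (by name: the statement is the Claim_ definition above) =====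
theorem generateCassette2ElectronicsConfigMG_py_spec : Claim_equal_generateCassette2ElectronicsConfigMG_py := by
  intro n _
  unfold Spec_generateCassette2ElectronicsConfigMG_py generateCassette2ElectronicsConfigMG_py
    generateCassette2ElectronicsConfigMG_py_alt
  by_cases h : n ≤ 0
  · -- empty range
    have : PySem.List.pyRange 0 n 1 = [] := by
      unfold PySem.List.pyRange
      simp
      omega
    simp [this]
  · obtain ⟨m, rfl⟩ : ∃ m : Nat, n = (m : Int) := ⟨n.toNat, by omega⟩
    rw [PySem.List.pyRange_zero_natCast]
    have := pvLoopInv m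
    simp only [this, List.map_map]
    rfl
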